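-- pv_equiv track=rewrite | github.com/RajMarkandeSingh/All-Codechef-Starters-solution | Sum of modes.py | sum_of_modes
-- ===== SOURCE A (Python) =====
-- def sum_of_modes(s):
--     n = len(s)
--     ans = n * (n + 1) // 2
--     cnt = {0: 1}
--     ac,bc =0,0
--     for c in s:
--         if c == '0':
--             ac+= 1
--         else:
--             bc += 1
--         val=ac-bc
--         if val in cnt:
--             ans += cnt[val]
--             cnt[val] += 1
--         else:
--             cnt[val] = 1
--     return ans
-- ===== SOURCE B (Python) =====
-- def sum_of_modes(s):
--     n = len(s)
--     # Build the list of prefix differences (#'0' minus #other), including the empty prefix.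
--     pref = [0]
--     d = 0
--     for c in s:
--         d += 1 if c == '0' else -1
--         pref.append(d)
--     # Sort it; equal prefix differences become adjacent runs, and each run of
--     # length r contributes r*(r-1)//2 balanced substrings.
--     pref.sort()
--     pairs = 0
--     run = 1
--     prev = pref[0]
--     for v in pref[1:]:
--         if v == prev:
--             run += 1
--         else:
--             pairs += run * (run - 1) // 2
--             run = 1
--             prev = v
--     pairs += run * (run - 1) // 2
--     return n * (n + 1) // 2 + pairs
-- ===== Notes on version B (the rewrite author's own statement) =====
-- stated objective: alternative
-- what changed: A counts balanced substrings online with a hash map of prefix-difference frequencies, adding the current frequency at every step; B drops the hash map entirely: it materialises the list of prefix differences, sorts it, and counts equal pairs by a run-length scan over the sorted list, returning n*(n+1)//2 plus the run pair counts.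
import Mathlib
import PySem

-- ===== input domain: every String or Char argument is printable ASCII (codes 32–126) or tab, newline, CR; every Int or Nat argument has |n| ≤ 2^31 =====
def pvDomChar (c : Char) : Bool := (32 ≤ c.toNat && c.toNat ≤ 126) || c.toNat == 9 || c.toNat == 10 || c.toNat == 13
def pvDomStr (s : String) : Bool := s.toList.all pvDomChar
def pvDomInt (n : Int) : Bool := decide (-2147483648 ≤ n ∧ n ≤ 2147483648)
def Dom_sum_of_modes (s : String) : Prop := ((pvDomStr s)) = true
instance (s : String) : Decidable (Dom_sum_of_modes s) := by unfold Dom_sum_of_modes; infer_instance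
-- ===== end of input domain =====

-- B replaces A's online hash-map frequency counting by sort-then-run-length-scan: alternative algorithm, O(n log n) instead of O(n).

-- ===== PORT A =====
-- A's loop body: update ac/bc, compute val = ac - bc, then the in/else branch on cnt.
def sumOfModesStepA (st : Int × PySem.Dict Int Int × Int × Int) (c : Char) :
    Int × PySem.Dict Int Int × Int × Int :=
  let ac := if c = '0' then st.2.2.1 + 1 else st.2.2.1
  let bc := if c = '0' then st.2.2.2 else st.2.2.2 + 1
  let val := ac - bc
  if st.2.1.contains val then
    (st.1 + st.2.1.getD val 0, st.2.1.insert val (st.2.1.getD val 0 + 1), ac, bc)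
  else
    (st.1, st.2.1.insert val 1, ac, bc)

def sum_of_modes (s : String) : Int :=
  let n : Int := PySem.Str.len s
  let ans := PySem.Int.floordiv (n * (n + 1)) 2
  (s.toList.foldl sumOfModesStepA (ans, PySem.Dict.ofList [((0 : Int), (1 : Int))], 0, 0)).1

-- ===== PORT B =====
-- B's first loop: d += 1 if c == '0' else -1; pref.append(d)
def sumOfModesBuild (st : List Int × Int) (c : Char) : List Int × Int :=
  let d := st.2 + (if c = '0' then 1 else -1)
  (st.1 ++ [d], d)

-- B's second loop over pref[1:]: state (pairs, run, prev)
def sumOfModesScan (st : Int × Int × Int) (v : Int) : Int × Int × Int :=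
  if v = st.2.2 then (st.1, st.2.1 + 1, st.2.2)
  else (st.1 + PySem.Int.floordiv (st.2.1 * (st.2.1 - 1)) 2, 1, v)

def sum_of_modes_alt (s : String) : Int :=
  let n : Int := PySem.Str.len s
  let pref := (s.toList.foldl sumOfModesBuild ([0], 0)).1
  let sp := PySem.List.sorted pref (fun x => x) false
  let r := sp.tail.foldl sumOfModesScan (0, 1, PySem.List.pyGetD sp 0 0)
  PySem.Int.floordiv (n * (n + 1)) 2 + (r.1 + PySem.Int.floordiv (r.2.1 * (r.2.1 - 1)) 2)

-- ===== PRECONDITION & SPEC =====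
def Spec_sum_of_modes (s : String) (out : Int) : Prop := out = sum_of_modes_alt s
instance (s : String) (out : Int) : Decidable (Spec_sum_of_modes s out) := by unfold Spec_sum_of_modes; infer_instance

-- ===== CLAIM (what is proved, stated in full; the proofs are below) =====
def Claim_equal_sum_of_modes : Prop := ∀ (s : String), Dom_sum_of_modes s → Spec_sum_of_modes s (sum_of_modes s)

-- ===== LEMMAS AND PROOFS =====

-- C(f,2) = f*(f-1)//2
def pvC2 (f : Int) : Int := PySem.Int.floordiv (f * (f - 1)) 2

theorem pvC2_succ (c : Int) : pvC2 (c + 1) = pvC2 c + c := by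
  unfold pvC2
  rw [PySem.Int.floordiv_eq_ediv_of_pos (by norm_num),
      PySem.Int.floordiv_eq_ediv_of_pos (by norm_num)]
  obtain ⟨m, hm⟩ := Int.even_mul_succ_self (c - 1)
  have h1 : c * (c - 1) = 2 * m := by linear_combination hm
  have h2 : (c + 1) * (c + 1 - 1) = 2 * (m + c) := by linear_combination hm
  rw [h1, h2, Int.mul_ediv_cancel_left _ (by norm_num), Int.mul_ediv_cancel_left _ (by norm_num)]

-- the list of n prefix differences produced while scanning l with running value d
def pvDeltas : List Char → Int → List Int
  | [], _ => []
  | c :: t, d => (d + (if c = '0' then 1 else -1)) :: pvDeltas t (d + (if c = '0' then 1 else -1))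

-- pair count: number of index pairs i < j with equal values
def pvP : List Int → Int
  | [] => 0
  | x :: t => (t.count x : Int) + pvP t

-- A's total ans-increment as a function of the "frequency so far" function g
def pvWg : (Int → Int) → List Int → Int
  | _, [] => 0
  | g, x :: t => g x + pvWg (fun v => g v + if v = x then 1 else 0) t

-- A's loop: regardless of the in/else branch, each step adds cnt.getD val 0 and increments the count.
theorem pvLoopA (l : List Char) : ∀ (ans : Int) (cnt : PySem.Dict Int Int) (ac bc : Int)
    (g : Int → Int), (∀ v, cnt.getD v 0 = g v) →
    (l.foldl sumOfModesStepA (ans, cnt, ac, bc)).1 = ans + pvWg g (pvDeltas l (ac - bc)) := by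
  induction l with
  | nil => intro ans cnt ac bc g _; simp [pvDeltas, pvWg]
  | cons c t ih =>
    intro ans cnt ac bc g hg
    have hstep : sumOfModesStepA (ans, cnt, ac, bc) c
        = (ans + cnt.getD (ac - bc + (if c = '0' then 1 else -1)) 0,
           cnt.insert (ac - bc + (if c = '0' then 1 else -1))
             (cnt.getD (ac - bc + (if c = '0' then 1 else -1)) 0 + 1),
           (if c = '0' then ac + 1 else ac), (if c = '0' then bc else bc + 1)) := by
      unfold sumOfModesStepA
      have hval : (if c = '0' then ac + 1 else ac) - (if c = '0' then bc else bc + 1)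
          = ac - bc + (if c = '0' then 1 else -1) := by split <;> ring
      simp only [hval]
      by_cases hc : cnt.contains (ac - bc + (if c = '0' then 1 else -1)) = true
      · simp [hc]
      · have hc' : cnt.contains (ac - bc + (if c = '0' then 1 else -1)) = false := by
          simpa using hc
        rw [PySem.Dict.getD_of_not_contains cnt 0 hc']
        simp [hc']
    set v0 := ac - bc + (if c = '0' then 1 else -1) with hv0
    have hd' : (if c = '0' then ac + 1 else ac) - (if c = '0' then bc else bc + 1) = v0 := by
      rw [hv0]; split <;> ring
    have hg' : ∀ v, (cnt.insert v0 (cnt.getD v0 0 + 1)).getD v 0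
        = g v + if v = v0 then 1 else 0 := by
      intro v
      rw [PySem.Dict.getD_insert]
      split_ifs with h
      · subst h; rw [hg v0]
      · rw [hg v]; ring
    rw [List.foldl_cons, hstep,
        ih (ans + cnt.getD v0 0) (cnt.insert v0 (cnt.getD v0 0 + 1))
          (if c = '0' then ac + 1 else ac) (if c = '0' then bc else bc + 1)
          (fun v => g v + if v = v0 then 1 else 0) hg', hd']
    have hdl : pvDeltas (c :: t) (ac - bc) = v0 :: pvDeltas t v0 := rfl
    rw [hdl]
    have hwg : pvWg g (v0 :: pvDeltas t v0)
        = g v0 + pvWg (fun v => g v + if v = v0 then 1 else 0) (pvDeltas t v0) := rfl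
    rw [hwg, hg v0]
    ring

theorem pvP_append_singleton (s : List Int) (x : Int) :
    pvP (s ++ [x]) = pvP s + (s.count x : Int) := by
  induction s with
  | nil => simp [pvP]
  | cons y t ih =>
    show ((t ++ [x]).count y : Int) + pvP (t ++ [x])
        = (t.count y : Int) + pvP t + ((y :: t).count x : Int)
    rw [ih]
    by_cases hxy : x = y
    · subst hxy
      simp [List.count_append]
      ring
    · have hyx : ¬ y = x := fun h => hxy h.symm
      simp [List.count_append, hxy, hyx]
      ring

theorem pvWg_count (l : List Int) : ∀ s : List Int,
    pvWg (fun v => (s.count v : Int)) l = pvP (s ++ l) - pvP s := by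
  induction l with
  | nil => intro s; simp [pvWg]
  | cons x t ih =>
    intro s
    have hfun : (fun v => ((s.count v : Nat) : Int) + if v = x then 1 else 0)
        = fun v => ((s ++ [x]).count v : Int) := by
      funext v
      by_cases h : v = x
      · subst h; simp [List.count_append]
      · have h' : ¬ x = v := fun hh => h hh.symm
        simp [List.count_append, h, h']
    have hwg : pvWg (fun v => (s.count v : Int)) (x :: t)
        = (s.count x : Int)
          + pvWg (fun v => ((s.count v : Nat) : Int) + if v = x then 1 else 0) t := rfl
    rw [hwg, hfun, ih (s ++ [x])]
    have hassoc : s ++ [x] ++ t = s ++ x :: t := by simp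
    rw [hassoc, pvP_append_singleton]
    ring

theorem pvP_perm {l1 l2 : List Int} (h : l1.Perm l2) : pvP l1 = pvP l2 := by
  induction h with
  | nil => rfl
  | cons x h ih => simp only [pvP, ih, h.count_eq]
  | swap x y t =>
    show (( (x :: t).count y : Int) + ((t.count x : Int) + pvP t))
        = ((y :: t).count x : Int) + ((t.count y : Int) + pvP t)
    by_cases hxy : x = y
    · subst hxy; ring
    · have hyx : ¬ y = x := fun h => hxy h.symm
      simp [hxy, hyx]
      ring
  | trans _ _ ih1 ih2 => rw [ih1, ih2]

-- B's first loop builds acc ++ pvDeltas l d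
theorem pvLoopBuild (l : List Char) : ∀ (acc : List Int) (d : Int),
    (l.foldl sumOfModesBuild (acc, d)).1 = acc ++ pvDeltas l d := by
  induction l with
  | nil => intro acc d; simp [pvDeltas]
  | cons c t ih =>
    intro acc d
    show (t.foldl sumOfModesBuild
        (acc ++ [d + (if c = '0' then 1 else -1)], d + (if c = '0' then 1 else -1))).1
      = acc ++ pvDeltas (c :: t) d
    rw [ih]
    simp [pvDeltas]

-- B's run-length scan on a sorted tail counts pairs.
theorem pvLoopScan (t : List Int) : ∀ (pairs run prev : Int),
    (prev :: t).Pairwise (· ≤ ·) →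
    (t.foldl sumOfModesScan (pairs, run, prev)).1
        + pvC2 (t.foldl sumOfModesScan (pairs, run, prev)).2.1
      = pairs + pvC2 run + run * (t.count prev : Int) + pvP t := by
  induction t with
  | nil => intro pairs run prev _; simp [pvP]
  | cons v t' ih =>
    intro pairs run prev hpw
    have hpw' := List.pairwise_cons.mp hpw
    by_cases hvp : v = prev
    · subst hvp
      have hstep : sumOfModesScan (pairs, run, v) v = (pairs, run + 1, v) := by
        unfold sumOfModesScan; simp
      rw [List.foldl_cons, hstep, ih pairs (run + 1) v hpw'.2]
      have hc : (v :: t').count v = t'.count v + 1 := by simp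
      rw [pvC2_succ, hc]
      show pairs + (pvC2 run + run) + (run + 1) * (t'.count v : Int) + pvP t'
          = pairs + pvC2 run + run * ((t'.count v : Nat) + 1 : Nat) + ((t'.count v : Int) + pvP t')
      push_cast
      ring
    · have hstep : sumOfModesScan (pairs, run, prev) v
          = (pairs + pvC2 run, 1, v) := by
        unfold sumOfModesScan pvC2; simp [hvp]
      have hnotmem : prev ∉ v :: t' := by
        intro hmem
        rcases List.mem_cons.mp hmem with h | h
        · exact hvp h.symm
        · have h1 : prev ≤ v := hpw'.1 v (List.mem_cons_self ..)
          have h2 : v ≤ prev := (List.pairwise_cons.mp hpw'.2).1 prev h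
          exact hvp (le_antisymm h2 h1)
      have hcnt : (v :: t').count prev = 0 := List.count_eq_zero.mpr hnotmem
      have hcnt' : t'.count prev = 0 :=
        List.count_eq_zero.mpr (fun h => hnotmem (List.mem_cons_of_mem _ h))
      rw [List.foldl_cons, hstep, ih (pairs + pvC2 run) 1 v hpw'.2]
      have hC1 : pvC2 1 = 0 := by decide
      rw [hC1, hcnt]
      show pairs + pvC2 run + 0 + 1 * (t'.count v : Int) + pvP t'
          = pairs + pvC2 run + run * ((0 : Nat) : Int) + ((t'.count v : Int) + pvP t')
      push_cast
      ring

-- pair count of a nonempty sorted list via the scan result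
theorem pvScan_sorted (sp : List Int) (x : Int) (t : List Int) (hsp : sp = x :: t)
    (hpw : sp.Pairwise (· ≤ ·)) :
    (sp.tail.foldl sumOfModesScan (0, 1, PySem.List.pyGetD sp 0 0)).1
        + pvC2 (sp.tail.foldl sumOfModesScan (0, 1, PySem.List.pyGetD sp 0 0)).2.1
      = pvP sp := by
  subst hsp
  have hget : PySem.List.pyGetD (x :: t) 0 0 = x := PySem.List.pyGetD_zero_cons x t 0
  rw [List.tail_cons, hget, pvLoopScan t 0 1 x hpw]
  have hC1 : pvC2 1 = 0 := by decide
  show (0 : Int) + pvC2 1 + 1 * (t.count x : Int) + pvP t = (t.count x : Int) + pvP t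
  rw [hC1]
  ring

-- ===== VERDICT (by name: the statement is the Claim_ definition above) =====
theorem sum_of_modes_spec : Claim_equal_sum_of_modes := by
  intro s _
  unfold Spec_sum_of_modes
  -- name the two sides without the let-bindings (definitional)
  have hAe : sum_of_modes s
      = (s.toList.foldl sumOfModesStepA
          (PySem.Int.floordiv (PySem.Str.len s * (PySem.Str.len s + 1)) 2,
           PySem.Dict.ofList [((0 : Int), (1 : Int))], 0, 0)).1 := rfl
  have hBe : sum_of_modes_alt s
      = PySem.Int.floordiv (PySem.Str.len s * (PySem.Str.len s + 1)) 2
        + (((PySem.List.sorted ((s.toList.foldl sumOfModesBuild ([0], 0)).1) (fun x => x) false).tail.foldl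
              sumOfModesScan
              (0, 1, PySem.List.pyGetD
                (PySem.List.sorted ((s.toList.foldl sumOfModesBuild ([0], 0)).1) (fun x => x) false) 0 0)).1
           + pvC2 ((PySem.List.sorted ((s.toList.foldl sumOfModesBuild ([0], 0)).1) (fun x => x) false).tail.foldl
              sumOfModesScan
              (0, 1, PySem.List.pyGetD
                (PySem.List.sorted ((s.toList.foldl sumOfModesBuild ([0], 0)).1) (fun x => x) false) 0 0)).2.1) := rfl
  rw [hAe, hBe]
  -- A side: ans-increments total pvP (0 :: deltas)
  have hd0 : PySem.Dict.ofList [((0 : Int), (1 : Int))] = PySem.Dict.empty.insert 0 1 := rfl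
  have hg0 : ∀ v : Int, (PySem.Dict.ofList [((0 : Int), (1 : Int))]).getD v 0
      = (([0] : List Int).count v : Int) := by
    intro v
    rw [hd0, PySem.Dict.getD_insert]
    by_cases h : v = 0
    · simp [h]
    · have h' : ¬ (0 : Int) = v := fun hh => h hh.symm
      simp [h, h', PySem.Dict.getD_empty]
  have hA := pvLoopA s.toList (PySem.Int.floordiv (PySem.Str.len s * (PySem.Str.len s + 1)) 2)
      (PySem.Dict.ofList [((0 : Int), (1 : Int))]) 0 0 _ hg0
  simp only [show (0 : Int) - 0 = 0 from rfl] at hA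
  rw [hA, pvWg_count (pvDeltas s.toList 0) [0]]
  have hP0 : pvP [0] = 0 := by simp [pvP]
  rw [hP0]
  -- B side
  have hpref : (s.toList.foldl sumOfModesBuild ([0], 0)).1 = 0 :: pvDeltas s.toList 0 := by
    rw [pvLoopBuild]; rfl
  rw [hpref]
  set L : List Int := (0 : Int) :: pvDeltas s.toList 0 with hL
  set sp := PySem.List.sorted L (fun x => x) false with hspdef
  have hperm : sp.Perm L := PySem.List.sorted_perm L (fun x => x) false
  have hpw : sp.Pairwise (· ≤ ·) := by
    have := PySem.List.sorted_pairwise L (fun x => x)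
    simpa [hspdef] using this
  have hne : sp ≠ [] := by
    intro h
    have := hperm.length_eq
    rw [h, hL] at this
    simp at this
  obtain ⟨x, t, hxt⟩ := List.exists_cons_of_ne_nil hne
  have hscan := pvScan_sorted sp x t hxt hpw
  rw [hscan, pvP_perm hperm]
  show PySem.Int.floordiv (PySem.Str.len s * (PySem.Str.len s + 1)) 2 + (pvP ([0] ++ pvDeltas s.toList 0) - 0)
      = PySem.Int.floordiv (PySem.Str.len s * (PySem.Str.len s + 1)) 2 + pvP L
  rw [hL]
  simp
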